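-- pv_equiv track=rewrite | github.com/LuciusLan/NegationProject | util.py | cue_match
-- ===== SOURCE A (Python) =====
-- def cue_match(pred, tar):
--     tar_cue_pos = []
--     pred_cue_pos = []
--     for i, e in enumerate(tar):
--         if e == 3:
--             tar_cue_pos.append(i)
--     for i, e in enumerate(pred):
--         if e == 3:
--             pred_cue_pos.append(i)
--     tar_cue_pos = set(tar_cue_pos)
--     pred_cue_pos = set(pred_cue_pos)
--     match = tar_cue_pos.intersection(pred_cue_pos)
--     if len(tar_cue_pos) != 0:
--         if tar_cue_pos == pred_cue_pos:
--             p = 1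
--             t = 1
--         else:
--             p = 0
--             t = 1
--     else:
--         if tar_cue_pos == pred_cue_pos:
--             p = 0
--             t = 0
--         else:
--             p = 1
--             t = 0
--     return p, t
-- ===== SOURCE B (Python) =====
-- def cue_match(pred, tar):
--     n = max(len(pred), len(tar))
--     same = all(((tar[i] if i < len(tar) else 0) == 3) == ((pred[i] if i < len(pred) else 0) == 3)
--                for i in range(n))
--     has_tar = any(e == 3 for e in tar)
--     p = 1 if has_tar == same else 0
--     t = 1 if has_tar else 0
--     return p, t
-- ===== Notes on version B (the rewrite author's own statement) =====
-- stated objective: simpler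
-- what changed: Replaces the two position lists, their set conversion and the set comparison with a single element-wise pass over the padded index range checking (tar[i]==3) == (pred[i]==3), plus an any() for cue presence.
import Mathlib
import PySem

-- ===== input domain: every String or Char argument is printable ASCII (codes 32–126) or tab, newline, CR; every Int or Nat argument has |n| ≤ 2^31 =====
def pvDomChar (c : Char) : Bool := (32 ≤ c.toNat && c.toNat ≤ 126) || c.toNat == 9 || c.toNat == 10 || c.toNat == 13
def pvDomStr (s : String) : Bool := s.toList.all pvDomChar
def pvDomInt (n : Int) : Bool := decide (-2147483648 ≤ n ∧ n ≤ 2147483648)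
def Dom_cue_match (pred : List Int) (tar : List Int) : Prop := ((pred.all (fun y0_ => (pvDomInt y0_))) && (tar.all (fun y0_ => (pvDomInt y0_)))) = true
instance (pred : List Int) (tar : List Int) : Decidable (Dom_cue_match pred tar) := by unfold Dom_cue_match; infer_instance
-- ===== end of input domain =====

-- B replaces A's position lists, set conversion and set comparison with one element-wise pass over the padded index range (objective: simpler).

-- ===== PORT A =====
def cue_match (pred : List Int) (tar : List Int) : Int × Int :=
  let tar_cue_pos :=
    (PySem.List.enumerate tar 0).foldl
      (fun acc ie => if ie.2 == 3 then acc ++ [ie.1] else acc) ([] : List Int)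
  let pred_cue_pos :=
    (PySem.List.enumerate pred 0).foldl
      (fun acc ie => if ie.2 == 3 then acc ++ [ie.1] else acc) ([] : List Int)
  let tarS : PySem.Set Int := PySem.Set.ofList tar_cue_pos
  let predS : PySem.Set Int := PySem.Set.ofList pred_cue_pos
  let _mtch : PySem.Set Int := PySem.Set.inter tarS predS   -- Python binds 'match' and never uses it
  if PySem.Set.len tarS ≠ 0 then
    if PySem.Set.equal tarS predS then (1, 1) else (0, 1)
  else
    if PySem.Set.equal tarS predS then (0, 0) else (1, 0)

-- ===== PORT B =====
def cue_match_alt (pred : List Int) (tar : List Int) : Int × Int :=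
  let n := max pred.length tar.length
  let same := (List.range n).all
    (fun i => ((if i < tar.length then tar.getD i 0 else 0) == 3)
            == ((if i < pred.length then pred.getD i 0 else 0) == 3))
  let has_tar := tar.any (fun e => e == 3)
  ((if has_tar == same then 1 else 0), (if has_tar then 1 else 0))

-- ===== PRECONDITION & SPEC =====
def Spec_cue_match (pred : List Int) (tar : List Int) (out : Int × Int) : Prop := out = cue_match_alt pred tar
instance (pred : List Int) (tar : List Int) (out : Int × Int) : Decidable (Spec_cue_match pred tar out) := by unfold Spec_cue_match; infer_instance

-- ===== CLAIM (what is proved, stated in full; the proofs are below) =====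
def Claim_equal_cue_match : Prop := ∀ (pred : List Int) (tar : List Int), Dom_cue_match pred tar → Spec_cue_match pred tar (cue_match pred tar)

-- ===== LEMMAS AND PROOFS =====

-- "index i is a cue position": shared characterisation both programs are reduced to
def Q (xs : List Int) (i : Nat) : Prop := i < xs.length ∧ xs.getD i 0 = 3

-- membership in A's appended position list
theorem mem_cuePos (xs : List Int) (x : Int) :
    x ∈ (PySem.List.enumerate xs 0).foldl
      (fun acc ie => if ie.2 == 3 then acc ++ [ie.1] else acc) ([] : List Int)
    ↔ ∃ k : Nat, k < xs.length ∧ x = (k : Int) ∧ xs.getD k 0 = 3 := by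
  rw [show (PySem.List.enumerate xs 0).foldl
      (fun acc ie => if ie.2 == 3 then acc ++ [ie.1] else acc) ([] : List Int)
      = [] ++ ((PySem.List.enumerate xs 0).filter (fun ie => ie.2 == 3)).map (fun ie => ie.1)
    from PySem.List.foldl_append_if _ _ _ _]
  simp only [List.nil_append, List.mem_map, List.mem_filter, PySem.List.mem_enumerate_iff]
  constructor
  · rintro ⟨⟨i, e⟩, ⟨⟨k, hk, hp⟩, h3⟩, rfl⟩
    injection hp with h1 h2
    subst h1; subst h2
    refine ⟨k, hk, by simp, ?_⟩
    rw [List.getD_eq_getElem _ _ hk]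
    simpa using h3
  · rintro ⟨k, hk, rfl, h3⟩
    refine ⟨((k : Int), xs[k]), ⟨⟨k, hk, by simp⟩, ?_⟩, rfl⟩
    rw [List.getD_eq_getElem _ _ hk] at h3
    simpa using h3

-- A's set-equality test means index-wise agreement of cue positions
theorem equal_iff (pred tar : List Int) :
    PySem.Set.equal
      (PySem.Set.ofList ((PySem.List.enumerate tar 0).foldl
        (fun acc ie => if ie.2 == 3 then acc ++ [ie.1] else acc) ([] : List Int)))
      (PySem.Set.ofList ((PySem.List.enumerate pred 0).foldl
        (fun acc ie => if ie.2 == 3 then acc ++ [ie.1] else acc) ([] : List Int))) = true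
    ↔ ∀ i : Nat, Q tar i ↔ Q pred i := by
  simp only [PySem.Set.equal, PySem.Set.issubset, Bool.and_eq_true, List.all_eq_true,
    PySem.Set.contains_iff, PySem.Set.mem_ofList, mem_cuePos]
  constructor
  · rintro ⟨h1, h2⟩ i
    constructor
    · rintro ⟨hi, h3⟩
      obtain ⟨k, hk, hki, h3'⟩ := h1 (i : Int) ⟨i, hi, rfl, h3⟩
      have : i = k := by exact_mod_cast hki
      subst this; exact ⟨hk, h3'⟩
    · rintro ⟨hi, h3⟩
      obtain ⟨k, hk, hki, h3'⟩ := h2 (i : Int) ⟨i, hi, rfl, h3⟩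
      have : i = k := by exact_mod_cast hki
      subst this; exact ⟨hk, h3'⟩
  · intro h
    constructor
    · rintro x ⟨k, hk, rfl, h3⟩
      obtain ⟨hk', h3'⟩ := (h k).1 ⟨hk, h3⟩
      exact ⟨k, hk', rfl, h3'⟩
    · rintro x ⟨k, hk, rfl, h3⟩
      obtain ⟨hk', h3'⟩ := (h k).2 ⟨hk, h3⟩
      exact ⟨k, hk', rfl, h3'⟩

-- nonemptiness of A's target cue set
theorem len_ne_iff (tar : List Int) :
    PySem.Set.len (PySem.Set.ofList ((PySem.List.enumerate tar 0).foldl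
        (fun acc ie => if ie.2 == 3 then acc ++ [ie.1] else acc) ([] : List Int))) ≠ 0
    ↔ ∃ i : Nat, Q tar i := by
  rw [show (PySem.Set.len (PySem.Set.ofList ((PySem.List.enumerate tar 0).foldl
        (fun acc ie => if ie.2 == 3 then acc ++ [ie.1] else acc) ([] : List Int))) ≠ 0)
      ↔ (PySem.Set.ofList ((PySem.List.enumerate tar 0).foldl
        (fun acc ie => if ie.2 == 3 then acc ++ [ie.1] else acc) ([] : List Int))) ≠ [] by
    simp [PySem.Set.len, List.length_eq_zero_iff]]
  rw [← List.isEmpty_eq_false_iff, List.isEmpty_eq_false_iff_exists_mem]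
  simp only [PySem.Set.mem_ofList, mem_cuePos]
  constructor
  · rintro ⟨x, k, hk, rfl, h3⟩; exact ⟨k, hk, h3⟩
  · rintro ⟨i, hi, h3⟩; exact ⟨(i : Int), i, hi, rfl, h3⟩

-- B's has_tar
theorem any_iff (tar : List Int) :
    tar.any (fun e => e == 3) = true ↔ ∃ i : Nat, Q tar i := by
  simp only [List.any_eq_true, beq_iff_eq, Q]
  constructor
  · rintro ⟨e, he, h3⟩
    subst h3
    obtain ⟨i, hi, hgi⟩ := List.mem_iff_getElem.1 he
    exact ⟨i, hi, by rw [List.getD_eq_getElem _ _ hi, hgi]⟩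
  · rintro ⟨i, hi, h3⟩
    exact ⟨tar[i], List.getElem_mem hi, by rw [List.getD_eq_getElem _ _ hi] at h3; exact h3⟩

theorem guard_iff (xs : List Int) (i : Nat) :
    ((if i < xs.length then xs.getD i 0 else 0) = 3) ↔ Q xs i := by
  unfold Q
  split
  · next h => simp [h]
  · next h => simp [h]

-- B's element-wise pass
theorem same_iff (pred tar : List Int) :
    (List.range (max pred.length tar.length)).all
      (fun i => ((if i < tar.length then tar.getD i 0 else 0) == 3)
              == ((if i < pred.length then pred.getD i 0 else 0) == 3)) = true
    ↔ ∀ i : Nat, Q tar i ↔ Q pred i := by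
  simp only [List.all_eq_true, List.mem_range]
  have point : ∀ (x y : Int), ((x == 3) == (y == 3)) = true ↔ ((x = 3) ↔ (y = 3)) := by
    intro x y
    by_cases hx : x = 3 <;> by_cases hy : y = 3 <;> simp [hx, hy]
  constructor
  · intro h i
    rw [← guard_iff tar i, ← guard_iff pred i]
    by_cases hi : i < max pred.length tar.length
    · exact (point _ _).1 (h i hi)
    · have h1 : ¬ i < tar.length := by omega
      have h2 : ¬ i < pred.length := by omega
      simp [h1, h2]
  · intro h i _
    rw [point]
    rw [guard_iff tar i, guard_iff pred i]
    exact h i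

theorem cue_match_eq (pred tar : List Int) :
    cue_match pred tar = cue_match_alt pred tar := by
  have hlen := len_ne_iff tar
  have heq := equal_iff pred tar
  have hany := any_iff tar
  have hsame := same_iff pred tar
  simp only [cue_match, cue_match_alt]
  by_cases hE : ∃ i, Q tar i
  · by_cases hS : ∀ i, Q tar i ↔ Q pred i
    · rw [if_pos (hlen.2 hE), if_pos (heq.2 hS), hany.2 hE, hsame.2 hS]
      simp
    · have hs' : (List.range (max pred.length tar.length)).all
        (fun i => ((if i < tar.length then tar.getD i 0 else 0) == 3)
              == ((if i < pred.length then pred.getD i 0 else 0) == 3)) = false := by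
        have := mt hsame.1 hS
        simpa using this
      rw [if_pos (hlen.2 hE), if_neg (fun h => hS (heq.1 h)), hany.2 hE, hs']
      simp
  · by_cases hS : ∀ i, Q tar i ↔ Q pred i
    · have ha' : tar.any (fun e => e == 3) = false := by
        have := mt hany.1 hE
        simp only [Bool.not_eq_true] at this
        exact this
      rw [if_neg (fun h => hE (hlen.1 h)), if_pos (heq.2 hS), ha', hsame.2 hS]
      simp
    · have ha' : tar.any (fun e => e == 3) = false := by
        have := mt hany.1 hE
        simp only [Bool.not_eq_true] at this
        exact this
      have hs' : (List.range (max pred.length tar.length)).all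
        (fun i => ((if i < tar.length then tar.getD i 0 else 0) == 3)
              == ((if i < pred.length then pred.getD i 0 else 0) == 3)) = false := by
        have := mt hsame.1 hS
        simpa using this
      rw [if_neg (fun h => hE (hlen.1 h)), if_neg (fun h => hS (heq.1 h)), ha', hs']
      simp

-- ===== VERDICT (by name: the statement is the Claim_ definition above) =====
theorem cue_match_spec : Claim_equal_cue_match := by
  intro pred tar _
  unfold Spec_cue_match
  exact cue_match_eq pred tar
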